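-- pv_equiv track=rewrite | github.com/merdovash/pyment | pyment/comment_builder/function.py | _format_name_as_description
-- ===== SOURCE A (Python) =====
-- def _format_name_as_description(name):
--     """Format function name as a description by splitting into words and capitalizing first word.
--
--     Examples:
--     - hello_world -> "Hello world"
--     - calculate_total_sum -> "Calculate total sum"
--     - UserAccountManager -> "User account manager"
--     - __init__ -> "Initialize"
--     - func1 -> "Func1"
--
--     :param name: the function name
--     :type name: str
--     :return: formatted description
--     :rtype: str
--     """
--     if not name:
--         return ''
--
--     # Handle special methods like __init__, __str__, etc.
--     if name.startswith('__') and name.endswith('__'):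
--         # Remove leading and trailing underscores
--         inner = name[2:-2]
--         if inner:
--             # For __init__, return "Initialize", for others capitalize first letter
--             if inner == 'init':
--                 return 'Initialize'
--             # Capitalize first letter
--             return inner[0].upper() + inner[1:].lower()
--         return name
--
--     # Split on underscores first
--     parts = name.split('_')
--
--     # For each part, split on camelCase boundaries
--     words = []
--     for part in parts:
--         if not part:
--             continue
--
--         # Split camelCase: insert space before each capital letter (except the first)
--         camel_parts = []
--         current_word = ''
--         for i, char in enumerate(part):
--             if char.isupper() and i > 0 and current_word:
--                 # Start a new word
--                 camel_parts.append(current_word)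
--                 current_word = char
--             else:
--                 current_word += char
--         if current_word:
--             camel_parts.append(current_word)
--
--         words.extend(camel_parts)
--
--     if not words:
--         return name
--
--     # Join words with spaces and capitalize first word
--     result = ' '.join(words)
--     # Capitalize first letter only
--     return result[0].upper() + result[1:].lower() if len(result) > 1 else result.upper()
-- ===== SOURCE B (Python) =====
-- def _format_name_as_description(name):
--     """Format function name as a description (staged marker/split version)."""
--     if not name:
--         return ''
--
--     if name.startswith('__') and name.endswith('__'):
--         inner = name[2:-2]
--         if not inner:
--             return name
--         if inner == 'init':
--             return 'Initialize'
--         return inner[:1].upper() + inner[1:].lower()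
--
--     # Stage 1: mark every word boundary with a sentinel that cannot occur in the
--     # name (underscores become the sentinel, and a sentinel is inserted before
--     # every uppercase letter).  Stage 2: split on the sentinel and drop empties.
--     sep = '\x00'
--     marked = ''.join(sep if c == '_' else (sep + c if c.isupper() else c) for c in name)
--     tokens = [t for t in marked.split(sep) if t]
--
--     if not tokens:
--         return name
--
--     text = ' '.join(tokens)
--     return text[:1].upper() + text[1:].lower()
-- ===== Notes on version B (the rewrite author's own statement) =====
-- stated objective: simpler
-- what changed: Replaced A's two-level tokenization (split on '_' plus an inner enumerate-based camelCase loop per part) with two staged passes: every boundary (underscore, or before an uppercase letter) is marked with a sentinel character that cannot occur in the name, then the marked string is split on the sentinel and empty pieces are dropped; the final capitalization is a uniform s[:1].upper()+s[1:].lower() slice expression instead of A's length-cased branches.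
import Mathlib
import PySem

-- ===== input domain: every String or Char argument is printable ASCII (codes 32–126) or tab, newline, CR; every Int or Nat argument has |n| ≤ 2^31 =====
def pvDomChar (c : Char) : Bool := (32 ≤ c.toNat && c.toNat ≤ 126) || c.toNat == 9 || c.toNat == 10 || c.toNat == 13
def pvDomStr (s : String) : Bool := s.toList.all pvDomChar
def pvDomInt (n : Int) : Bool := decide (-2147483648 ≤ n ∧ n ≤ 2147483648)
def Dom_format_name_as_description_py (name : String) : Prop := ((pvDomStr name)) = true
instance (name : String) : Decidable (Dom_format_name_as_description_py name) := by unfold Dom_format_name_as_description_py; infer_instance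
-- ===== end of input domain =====

-- B replaces A's two-level tokenizer (split('_') plus an inner enumerate-based camelCase loop
-- per part) by two staged passes: mark every word boundary with a sentinel character, then
-- split on the sentinel and drop empties; objective: simpler (same linear cost).

-- ===== PORT A =====
-- A's inner camelCase loop: for i, char in enumerate(part)
def pvA_step (acc : List (List Char) × List Char) (ci : Int × Char) : List (List Char) × List Char :=
  if PySem.Chars.isupper ci.2 && decide (0 < ci.1) && decide (acc.2 ≠ []) then
    (acc.1 ++ [acc.2], [ci.2])
  else (acc.1, acc.2 ++ [ci.2])

-- trailing 'if current_word: camel_parts.append(current_word)'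
def pvA_finish (st : List (List Char) × List Char) : List (List Char) :=
  if st.2 ≠ [] then st.1 ++ [st.2] else st.1

def pvA_camel (part : List Char) : List (List Char) :=
  pvA_finish ((PySem.List.enumerate part).foldl pvA_step ([], []))

-- 'for part in parts: if not part: continue; words.extend(camel_parts)'
def pvA_words (cs : List Char) : List (List Char) :=
  (PySem.Chars.splitOn cs ['_']).foldl
    (fun ws part => if part = [] then ws else ws ++ pvA_camel part) []

def pvA_core (cs : List Char) : List Char :=
  if cs = [] then []
  else if PySem.Chars.startswith cs ['_', '_'] && PySem.Chars.endswith cs ['_', '_'] then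
    let inner := PySem.Chars.slice cs (some 2) (some (-2))
    if inner ≠ [] then
      if inner = ['i', 'n', 'i', 't'] then "Initialize".toList
      else
        -- inner[0].upper() + inner[1:].lower(); guarded by inner ≠ [], so the [] arm is unreachable
        match inner with
        | [] => []
        | c :: rest => PySem.Chars.upperChar c :: PySem.Chars.lower rest
    else cs
  else
    let words := pvA_words cs
    if words = [] then cs
    else
      let result := PySem.Chars.join [' '] words
      if 1 < result.length then
        -- result[0].upper() + result[1:].lower(); result is nonempty here
        match result with
        | [] => []
        | c :: rest => PySem.Chars.upperChar c :: PySem.Chars.lower rest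
      else PySem.Chars.upper result

def format_name_as_description_py (name : String) : String :=
  String.ofList (pvA_core name.toList)

-- ===== PORT B =====
-- stage 1: mark every word boundary with the sentinel '\x00' (which no admitted name contains)
def pvB_mark (c : Char) : List Char :=
  if c = '_' then ['\x00']
  else if PySem.Chars.isupper c then ['\x00', c]
  else [c]

-- s[:1].upper() + s[1:].lower()
def pvB_cap (s : List Char) : List Char :=
  PySem.Chars.upper (PySem.Chars.slice s none (some 1)) ++
    PySem.Chars.lower (PySem.Chars.slice s (some 1) none)

def pvB_core (cs : List Char) : List Char :=
  if cs = [] then []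
  else if PySem.Chars.startswith cs ['_', '_'] && PySem.Chars.endswith cs ['_', '_'] then
    let inner := PySem.Chars.slice cs (some 2) (some (-2))
    if inner = [] then cs
    else if inner = ['i', 'n', 'i', 't'] then "Initialize".toList
    else pvB_cap inner
  else
    let marked := cs.flatMap pvB_mark
    -- stage 2: '[t for t in marked.split(sep) if t]'
    let tokens := (PySem.Chars.splitOn marked ['\x00']).filter (fun t => !t.isEmpty)
    if tokens = [] then cs
    else pvB_cap (PySem.Chars.join [' '] tokens)

def format_name_as_description_py_alt (name : String) : String :=
  String.ofList (pvB_core name.toList)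

-- ===== PRECONDITION & SPEC =====
def Spec_format_name_as_description_py (name : String) (out : String) : Prop := out = format_name_as_description_py_alt name
instance (name : String) (out : String) : Decidable (Spec_format_name_as_description_py name out) := by unfold Spec_format_name_as_description_py; infer_instance

-- ===== CLAIM (what is proved, stated in full; the proofs are below) =====
def Claim_equal_format_name_as_description_py : Prop := ∀ (name : String), Dom_format_name_as_description_py name → Spec_format_name_as_description_py name (format_name_as_description_py name)

-- ===== LEMMAS AND PROOFS =====

-- Reference chunker: Python's s.split(sep) for a single-char sep, as plain structural recursion
def pvChunks (sep : Char) : List Char → List Char → List (List Char)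
  | cur, [] => [cur]
  | cur, c :: rest => if c = sep then cur :: pvChunks sep [] rest else pvChunks sep (cur ++ [c]) rest

-- Reference tokenizer both ports are reduced to
def pvTok : List Char → List Char → List (List Char)
  | cur, [] => if cur = [] then [] else [cur]
  | cur, c :: rest =>
      if c = '_' then (if cur = [] then [] else [cur]) ++ pvTok [] rest
      else if PySem.Chars.isupper c && decide (cur ≠ []) then cur :: pvTok [c] rest
      else pvTok (cur ++ [c]) rest

theorem pvChunks_nil (sep : Char) (cur : List Char) : pvChunks sep cur [] = [cur] := rfl

theorem pvChunks_cons (sep : Char) (cur : List Char) (c : Char) (rest : List Char) :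
    pvChunks sep cur (c :: rest) =
      if c = sep then cur :: pvChunks sep [] rest else pvChunks sep (cur ++ [c]) rest := rfl

theorem pvTok_nil (cur : List Char) : pvTok cur [] = if cur = [] then [] else [cur] := rfl

theorem pvTok_cons (cur : List Char) (c : Char) (rest : List Char) :
    pvTok cur (c :: rest) =
      if c = '_' then (if cur = [] then [] else [cur]) ++ pvTok [] rest
      else if PySem.Chars.isupper c && decide (cur ≠ []) then cur :: pvTok [c] rest
      else pvTok (cur ++ [c]) rest := rfl

theorem pv_go_cons (sep : Char) (fuel : Nat) (c : Char) (rest cur : List Char) (acc : List (List Char)) :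
    PySem.Chars.splitOn.go [sep] (fuel+1) (c::rest) cur acc =
      if c = sep then PySem.Chars.splitOn.go [sep] fuel rest [] (cur.reverse :: acc)
      else PySem.Chars.splitOn.go [sep] fuel rest (c::cur) acc := by
  rw [PySem.Chars.splitOn.go]
  by_cases h : c = sep
  · simp [h, List.isPrefixOf]
  · simp [List.isPrefixOf, h, Ne.symm h]

theorem pv_go_nil_zero (sep : Char) (cur : List Char) (acc : List (List Char)) :
    PySem.Chars.splitOn.go [sep] 0 [] cur acc = (cur.reverse :: acc).reverse := by
  rw [PySem.Chars.splitOn.go]; simp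

theorem pv_go_nil_succ (sep : Char) (fuel : Nat) (cur : List Char) (acc : List (List Char)) :
    PySem.Chars.splitOn.go [sep] (fuel+1) [] cur acc = (cur.reverse :: acc).reverse := by
  rw [PySem.Chars.splitOn.go]; simp

theorem pv_go_eq (sep : Char) (l : List Char) : ∀ (fuel : Nat) (cur : List Char) (acc : List (List Char)),
    l.length ≤ fuel →
    PySem.Chars.splitOn.go [sep] fuel l cur acc = acc.reverse ++ pvChunks sep cur.reverse l := by
  induction l with
  | nil =>
    intro fuel cur acc _
    cases fuel with
    | zero => rw [pv_go_nil_zero]; simp [pvChunks_nil]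
    | succ f => rw [pv_go_nil_succ]; simp [pvChunks_nil]
  | cons c rest ih =>
    intro fuel cur acc hle
    cases fuel with
    | zero => simp at hle
    | succ f =>
      rw [pv_go_cons]
      simp only [List.length_cons] at hle
      by_cases h : c = sep
      · rw [if_pos h, ih f [] (cur.reverse :: acc) (by omega)]
        simp [pvChunks_cons, h]
      · rw [if_neg h, ih f (c :: cur) acc (by omega)]
        simp [pvChunks_cons, h]

theorem pv_splitOn_eq_chunks (sep : Char) (cs : List Char) :
    PySem.Chars.splitOn cs [sep] = pvChunks sep [] cs := by
  have := pv_go_eq sep cs (cs.length + 1) [] [] (by omega)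
  simpa [PySem.Chars.splitOn] using this

theorem pv_tok_append_underscore (l : List Char) : ∀ (r cur : List Char),
    pvTok cur (l ++ '_' :: r) = pvTok cur l ++ pvTok [] r := by
  induction l with
  | nil =>
    intro r cur
    rw [List.nil_append, pvTok_cons, if_pos rfl, pvTok_nil]
  | cons c rest ih =>
    intro r cur
    rw [List.cons_append, pvTok_cons, pvTok_cons]
    by_cases h : c = '_'
    · simp [h, ih]
    · rw [if_neg h, if_neg h]
      by_cases hu : (PySem.Chars.isupper c && decide (cur ≠ [])) = true
      · rw [if_pos hu, if_pos hu, ih]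
        simp
      · rw [if_neg hu, if_neg hu, ih]

-- A's camel loop, generalized over the running state (i > 0 and a non-empty current word)
theorem pv_camel_loop (xs : List Char) : ∀ (i : Int) (cur : List Char) (ts : List (List Char)),
    '_' ∉ xs → cur ≠ [] → 0 < i →
    pvA_finish ((PySem.List.enumerate xs i).foldl pvA_step (ts, cur)) = ts ++ pvTok cur xs := by
  induction xs with
  | nil => intro i cur ts _ hcur _; simp [PySem.List.enumerate, pvA_finish, pvTok_nil, hcur]
  | cons c rest ih =>
    intro i cur ts hnu hcur hi
    have hc : c ≠ '_' := fun h => hnu (by simp [h])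
    have hrest : '_' ∉ rest := fun h => hnu (by simp [h])
    have henum : PySem.List.enumerate (c :: rest) i = (i, c) :: PySem.List.enumerate rest (i + 1) := by
      simp [PySem.List.enumerate]
    rw [henum, List.foldl_cons]
    by_cases hu : PySem.Chars.isupper c = true
    · have hs : pvA_step (ts, cur) (i, c) = (ts ++ [cur], [c]) := by
        simp [pvA_step, hu, hi, hcur]
      rw [hs, ih (i + 1) [c] (ts ++ [cur]) hrest (by simp) (by omega)]
      simp [pvTok_cons, hc, hu, hcur]
    · have hs : pvA_step (ts, cur) (i, c) = (ts, cur ++ [c]) := by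
        simp [pvA_step, hu]
      rw [hs, ih (i + 1) (cur ++ [c]) ts hrest (by simp) (by omega)]
      simp [pvTok_cons, hc, hu]

theorem pv_camel_eq_tok (part : List Char) (h : '_' ∉ part) :
    pvA_camel part = pvTok [] part := by
  cases part with
  | nil => simp [pvA_camel, PySem.List.enumerate, pvA_finish, pvTok_nil]
  | cons c rest =>
    have hc : c ≠ '_' := fun hh => h (by simp [hh])
    have hrest : '_' ∉ rest := fun hh => h (by simp [hh])
    have henum : PySem.List.enumerate (c :: rest) 0 = (0, c) :: PySem.List.enumerate rest 1 := by
      simp [PySem.List.enumerate]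
    have h0 : pvA_step ([], []) (0, c) = ([], [c]) := by simp [pvA_step]
    simp only [pvA_camel, henum, List.foldl_cons, h0]
    rw [pv_camel_loop rest 1 [c] [] hrest (by simp) (by omega)]
    simp [pvTok_cons, hc]

theorem pv_chunks_fold (cs : List Char) : ∀ (cur : List Char) (ws : List (List Char)),
    '_' ∉ cur →
    (pvChunks '_' cur cs).foldl (fun ws part => if part = [] then ws else ws ++ pvA_camel part) ws
      = ws ++ pvTok [] (cur ++ cs) := by
  induction cs with
  | nil =>
    intro cur ws hcur
    rw [pvChunks_nil, List.append_nil, List.foldl_cons, List.foldl_nil]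
    by_cases h : cur = []
    · simp [h, pvTok_nil]
    · rw [if_neg h, pv_camel_eq_tok cur hcur]
  | cons c rest ih =>
    intro cur ws hcur
    rw [pvChunks_cons]
    by_cases h : c = '_'
    · rw [if_pos h, List.foldl_cons, h, pv_tok_append_underscore]
      by_cases hc : cur = []
      · rw [if_pos hc, ih [] ws (by simp), hc]
        simp [pvTok_nil]
      · rw [if_neg hc, ih [] (ws ++ pvA_camel cur) (by simp), pv_camel_eq_tok cur hcur]
        simp
    · rw [if_neg h, ih (cur ++ [c]) ws (by simp [hcur, eq_comm, h]), List.append_assoc]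
      simp

theorem pv_words_eq_tok (cs : List Char) : pvA_words cs = pvTok [] cs := by
  rw [pvA_words, pv_splitOn_eq_chunks, pv_chunks_fold cs [] [] (by simp)]
  simp

-- B's staged passes: chunking the marked copy on the sentinel and dropping empties
-- is the reference tokenizer
theorem pv_mark_chunks (cs : List Char) : ∀ (cur : List Char),
    '\x00' ∉ cs →
    (pvChunks '\x00' cur (cs.flatMap pvB_mark)).filter (fun t => !t.isEmpty) = pvTok cur cs := by
  induction cs with
  | nil =>
    intro cur _
    rw [List.flatMap_nil, pvChunks_nil, pvTok_nil]
    by_cases h : cur = []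
    · simp [h, List.filter]
    · have hne : cur.isEmpty = false := by simp [h]
      simp [List.filter, hne, h]
  | cons c rest ih =>
    intro cur hnul
    have hcr : '\x00' ∉ rest := fun h => hnul (by simp [h])
    have hcn : c ≠ '\x00' := fun h => hnul (by simp [h])
    rw [List.flatMap_cons, pvTok_cons]
    by_cases h : c = '_'
    · have hm : pvB_mark c = ['\x00'] := by simp [pvB_mark, h]
      rw [if_pos h, hm, List.cons_append, List.nil_append, pvChunks_cons, if_pos rfl,
        List.filter_cons, ih [] hcr]
      by_cases hc : cur = [] <;> simp [hc]
    · by_cases hu : PySem.Chars.isupper c = true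
      · have hm : pvB_mark c = ['\x00', c] := by simp [pvB_mark, h, hu]
        rw [if_neg h, hm]
        have : ('\x00' :: c :: []) ++ rest.flatMap pvB_mark
            = '\x00' :: c :: rest.flatMap pvB_mark := by simp
        rw [this, pvChunks_cons, if_pos rfl, pvChunks_cons, if_neg hcn, List.nil_append,
          List.filter_cons, ih [c] hcr]
        by_cases hc : cur = [] <;> simp [hc, hu]
      · have hm : pvB_mark c = [c] := by simp [pvB_mark, h, hu]
        rw [if_neg h, hm, List.cons_append, List.nil_append, pvChunks_cons, if_neg hcn,
          ih (cur ++ [c]) hcr]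
        simp [hu]

-- the two forms of 'capitalize first, lowercase the rest' agree
theorem pv_cap_eq (s : List Char) :
    pvB_cap s = match s with
      | [] => []
      | c :: rest => PySem.Chars.upperChar c :: PySem.Chars.lower rest := by
  cases s with
  | nil => simp [pvB_cap, PySem.List.slice, PySem.Chars.upper, PySem.Chars.lower]
  | cons c rest =>
    have h1 : PySem.List.slice (c :: rest) none (some 1) = [c] := by
      have := PySem.List.slice_to_natCast (c :: rest) 1
      simpa using this
    have h2 : PySem.List.slice (c :: rest) (some 1) none = rest := by
      have := PySem.List.slice_from_natCast (c :: rest) 1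
      simpa using this
    simp [pvB_cap, h1, h2, PySem.Chars.upper]

-- A's final 'capitalize the joined result' expression is B's cap helper
theorem pv_final (r : List Char) :
    (if 1 < r.length then
        match r with
        | [] => []
        | c :: rest => PySem.Chars.upperChar c :: PySem.Chars.lower rest
      else PySem.Chars.upper r) = pvB_cap r := by
  rw [pv_cap_eq]
  match r with
  | [] => simp [PySem.Chars.upper]
  | [c] => simp [PySem.Chars.upper, PySem.Chars.lower]
  | c :: d :: rest => simp

theorem pv_dom_no_nul (name : String) (h : Dom_format_name_as_description_py name) :
    '\x00' ∉ name.toList := by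
  intro hmem
  unfold Dom_format_name_as_description_py pvDomStr at h
  have := List.all_eq_true.mp h _ hmem
  simp [pvDomChar] at this

theorem pv_core_eq (cs : List Char) (hnul : '\x00' ∉ cs) : pvA_core cs = pvB_core cs := by
  unfold pvA_core pvB_core
  by_cases h0 : cs = []
  · simp [h0]
  rw [if_neg h0, if_neg h0]
  by_cases hd : (PySem.Chars.startswith cs ['_', '_'] && PySem.Chars.endswith cs ['_', '_']) = true
  · rw [if_pos hd, if_pos hd]
    set inner := PySem.Chars.slice cs (some 2) (some (-2)) with hinner
    by_cases hi : inner = []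
    · simp [hi]
    · rw [if_pos (by exact hi), if_neg hi]
      by_cases hin : inner = ['i', 'n', 'i', 't']
      · simp [hin]
      · rw [if_neg hin, if_neg hin, pv_cap_eq]
  · rw [if_neg hd, if_neg hd]
    rw [pv_words_eq_tok]
    have hB : List.filter (fun t => !t.isEmpty) (PySem.Chars.splitOn (List.flatMap pvB_mark cs) ['\x00']) = pvTok [] cs := by
      rw [pv_splitOn_eq_chunks, pv_mark_chunks cs [] hnul]
    simp only [hB, pv_final]

-- ===== VERDICT (by name: the statement is the Claim_ definition above) =====
theorem format_name_as_description_py_spec : Claim_equal_format_name_as_description_py := by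
  intro name hdom
  unfold Spec_format_name_as_description_py format_name_as_description_py format_name_as_description_py_alt
  rw [pv_core_eq name.toList (pv_dom_no_nul name hdom)]
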